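-- pv_equiv track=rewrite | github.com/althomas19/algorithmic-trading | Implementation/algorithmictrading/strategy/bollingerbands.py | createSignals
-- ===== SOURCE A (Python) =====
-- def createSignals(positions):
--     signals = positions
--     for x in range(1, len(signals)):
--         if (signals[x] == 0):
--             if (signals[x-1] == 1):
--                 signals[x] = 1
--         elif (signals[x] == -1):
--             signals[x] = 0
--     return signals
-- ===== SOURCE B (Python) =====
-- def createSignals(positions):
--     # Run-length segmentation: split the tail into maximal runs of zeros and
--     # fill each whole zero run in one bulk slice assignment from the value
--     # just before the run; nonzero entries are mapped pointwise (-1 -> 0).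
--     # Mutates the list in place like the original.
--     n = len(positions)
--     i = 1
--     while i < n:
--         if positions[i] == 0:
--             j = i
--             while j < n and positions[j] == 0:
--                 j += 1
--             fill = 1 if positions[i - 1] == 1 else 0
--             positions[i:j] = [fill] * (j - i)
--             i = j
--         else:
--             if positions[i] == -1:
--                 positions[i] = 0
--             i += 1
--     return positions
-- ===== Notes on version B (the rewrite author's own statement) =====
-- stated objective: alternative
-- what changed: Replaced the elementwise state-propagation loop by run-length segmentation: each maximal run of zeros in the tail is filled in one bulk slice assignment from the value preceding the run, and nonzero entries are mapped pointwise (-1 -> 0).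
import Mathlib
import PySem

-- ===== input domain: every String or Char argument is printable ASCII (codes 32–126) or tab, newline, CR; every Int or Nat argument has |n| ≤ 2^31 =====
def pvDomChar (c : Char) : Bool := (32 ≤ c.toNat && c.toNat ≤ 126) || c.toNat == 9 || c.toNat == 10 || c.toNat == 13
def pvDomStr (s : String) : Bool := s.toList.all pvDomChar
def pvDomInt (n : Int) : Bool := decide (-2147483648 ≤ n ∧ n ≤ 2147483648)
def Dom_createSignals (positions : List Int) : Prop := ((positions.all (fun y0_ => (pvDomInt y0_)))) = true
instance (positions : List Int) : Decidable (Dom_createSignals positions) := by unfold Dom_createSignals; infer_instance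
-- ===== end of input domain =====

-- B replaces A's elementwise state-propagation loop by run-length segmentation with bulk fills (alternative).
-- Both A and B mutate the argument list in place; the equivalence proved here is about the return value.

-- ===== PORT A =====
def createSignals (positions : List Int) : List Int :=
  (PySem.List.pyRange 1 positions.length 1).foldl
    (fun sig x =>
      if PySem.List.pyGetD sig x 0 = 0 then
        (if PySem.List.pyGetD sig (x - 1) 0 = 1 then PySem.List.pySetD sig x 1 else sig)
      else if PySem.List.pyGetD sig x 0 = -1 then PySem.List.pySetD sig x 0
      else sig)
    positions

-- ===== PORT B =====
-- The outer while loop over runs; `prev` is the (already processed) value at index i-1.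
def csRun (prev : Int) (l : List Int) : List Int :=
  match l with
  | [] => []
  | c :: cs =>
    if c = 0 then
      -- inner while loop: measure the maximal zero run (c and the zero prefix of cs),
      -- then replace it by one bulk fill
      let zs := List.takeWhile (fun v => v = 0) cs
      let rest := List.dropWhile (fun v => v = 0) cs
      let fill : Int := if prev = 1 then 1 else 0
      List.replicate (zs.length + 1) fill ++ csRun fill rest
    else
      (if c = -1 then 0 else c) :: csRun (if c = -1 then 0 else c) cs
termination_by l.length
decreasing_by
  · have := List.length_dropWhile_le (fun v : Int => decide (v = 0)) cs
    simp only [List.length_cons]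
    omega
  · simp

def createSignals_alt (positions : List Int) : List Int :=
  match positions with
  | [] => []
  | h :: t => h :: csRun h t

-- ===== PRECONDITION & SPEC =====
def Spec_createSignals (positions : List Int) (out : List Int) : Prop := out = createSignals_alt positions
instance (positions : List Int) (out : List Int) : Decidable (Spec_createSignals positions out) := by unfold Spec_createSignals; infer_instance

-- ===== CLAIM (what is proved, stated in full; the proofs are below) =====
def Claim_equal_createSignals : Prop := ∀ (positions : List Int), Dom_createSignals positions → Spec_createSignals positions (createSignals positions)

-- ===== LEMMAS AND PROOFS =====

-- A's loop body.
def csStep (sig : List Int) (x : Int) : List Int :=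
  if PySem.List.pyGetD sig x 0 = 0 then
    (if PySem.List.pyGetD sig (x - 1) 0 = 1 then PySem.List.pySetD sig x 1 else sig)
  else if PySem.List.pyGetD sig x 0 = -1 then PySem.List.pySetD sig x 0
  else sig

-- A's recurrence, elementwise.
def csCombine (prev cur : Int) : Int :=
  if cur = 0 then (if prev = 1 then 1 else 0)
  else if cur = -1 then 0 else cur

def csScan (prev : Int) : List Int → List Int
  | [] => []
  | c :: cs => let v := csCombine prev c; v :: csScan v cs

-- Invariant of A's loop: with the processed prefix `pre ++ [prev]` in place, the rest of the
-- loop turns the tail into csScan prev t.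
theorem csLoop (t pre : List Int) (prev : Int) :
    (PySem.List.pyRange ((pre.length : Int) + 1) ((pre.length : Int) + 1 + t.length) 1).foldl
      csStep (pre ++ prev :: t) = pre ++ prev :: csScan prev t := by
  induction t generalizing pre prev with
  | nil => simp [PySem.List.pyRange_one_eq_nil, csScan]
  | cons c cs ih =>
    rw [PySem.List.pyRange_one_cons (by simp only [List.length_cons]; push_cast; omega)]
    have hcur : PySem.List.pyGetD (pre ++ prev :: c :: cs) ((pre.length : Int) + 1) 0 = c := by
      have h1 : ((pre.length : Int) + 1) = (((pre ++ [prev]).length : Nat) : Int) := by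
        simp only [List.length_append, List.length_cons, List.length_nil]; push_cast; omega
      rw [h1, PySem.List.pyGetD_natCast,
        show pre ++ prev :: c :: cs = (pre ++ [prev]) ++ c :: cs by simp]
      simp [List.getD]
    have hprev : PySem.List.pyGetD (pre ++ prev :: c :: cs) ((pre.length : Int) + 1 - 1) 0 = prev := by
      have : ((pre.length : Int) + 1 - 1) = ((pre.length : Nat) : Int) := by omega
      rw [this, PySem.List.pyGetD_natCast]
      simp [List.getD]
    have hset : ∀ v : Int, PySem.List.pySetD (pre ++ prev :: c :: cs) ((pre.length : Int) + 1) v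
        = pre ++ prev :: v :: cs := by
      intro v
      have h1 : ((pre.length : Int) + 1) = (((pre.length + 1 : Nat)) : Int) := by push_cast; omega
      rw [h1, PySem.List.pySetD_natCast]
      have : pre ++ prev :: c :: cs = (pre ++ [prev]) ++ c :: cs := by simp
      rw [this, List.set_append]
      simp
    have hstep : csStep (pre ++ prev :: c :: cs) ((pre.length : Int) + 1)
        = (pre ++ [prev]) ++ csCombine prev c :: cs := by
      unfold csStep csCombine
      rw [hcur, hprev]
      simp only [hset]
      split_ifs <;> simp_all
    rw [List.foldl_cons, hstep]
    have harg : ((pre.length : Int) + 1 + 1) = (((pre ++ [prev]).length : Int) + 1) := by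
      simp only [List.length_append, List.length_cons, List.length_nil]; push_cast; omega
    have harg2 : ((pre.length : Int) + 1 + ((c :: cs).length : Int)) = (((pre ++ [prev]).length : Int) + 1 + cs.length) := by
      simp only [List.length_append, List.length_cons, List.length_nil]; push_cast; omega
    rw [harg2, harg, ih (pre ++ [prev]) (csCombine prev c)]
    simp [csScan]

-- scanning a 0/1 fill value over a zero prefix just replicates it
theorem csScan_zero_prefix (fill : Int) (hf : fill = 0 ∨ fill = 1) (cs : List Int) :
    csScan fill cs
      = List.replicate (cs.takeWhile (fun v => v = 0)).length fill
        ++ csScan fill (cs.dropWhile (fun v => v = 0)) := by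
  induction cs with
  | nil => simp
  | cons c cs ih =>
    by_cases hc : c = 0
    · subst hc
      have hcomb : csCombine fill 0 = fill := by
        rcases hf with h | h <;> simp [csCombine, h]
      simp only [csScan, hcomb, List.takeWhile_cons, List.dropWhile_cons]
      rw [ih]
      simp [List.replicate_succ]
    · simp [hc]

-- the run-based recursion computes the elementwise scan
theorem csScan_eq_csRun (l : List Int) (prev : Int) : csScan prev l = csRun prev l := by
  induction hn : l.length using Nat.strong_induction_on generalizing l prev with
  | _ n ih =>
  match l with
  | [] => rw [csRun.eq_def]; simp [csScan]
  | c :: cs =>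
    rw [csRun.eq_def]
    by_cases hc : c = 0
    · subst hc
      set fill : Int := if prev = 1 then 1 else 0 with hfill
      have hf : fill = 0 ∨ fill = 1 := by
        rw [hfill]; split_ifs <;> simp
      have h1 : csScan prev (0 :: cs) = fill :: csScan fill cs := by
        simp [csScan, csCombine, hfill]
      rw [h1, csScan_zero_prefix fill hf cs]
      have hrec : csScan fill (cs.dropWhile (fun v => v = 0))
          = csRun fill (cs.dropWhile (fun v => v = 0)) := by
        subst hn
        exact ih (cs.dropWhile (fun v => v = 0)).length
          (by have := List.length_dropWhile_le (fun v : Int => decide (v = 0)) cs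
              simp only [List.length_cons]; omega) _ _ rfl
      rw [hrec]
      simp [List.replicate_succ]
    · simp only [if_neg hc]
      have : csScan prev (c :: cs)
          = (if c = -1 then 0 else c) :: csScan (if c = -1 then 0 else c) cs := by
        simp [csScan, csCombine, hc]
      rw [this]
      subst hn
      rw [ih cs.length (by simp) cs _ rfl]

-- ===== VERDICT (by name: the statement is the Claim_ definition above) =====
theorem createSignals_spec : Claim_equal_createSignals := by
  intro positions _
  unfold Spec_createSignals createSignals createSignals_alt
  match positions with
  | [] => simp [PySem.List.pyRange_one_eq_nil]
  | h :: t =>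
    have := csLoop t [] h
    rw [csScan_eq_csRun] at this
    simpa [csStep, Int.add_comm] using this
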